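-- pv_equiv track=rewrite | github.com/wabbit-corp/kappa | scripts/kappa_fuzz_lib.py | entry_blocks_by_kind
-- ===== SOURCE A (Python) =====
-- def top_level_lines(block: str) -> list[str]:
--     return [line for line in block.splitlines() if line.strip() and not line.startswith((" ", "\t"))]
--
-- def entry_blocks_by_kind(text: str, entry_kind: str) -> list[str]:
--     blocks = [block.strip() for block in split_blocks(text) if block.strip()]
--     result: list[str] = []
--     for block in blocks:
--         top_lines = top_level_lines(block)
--         if not top_lines:
--             continue
--         first = top_lines[0].strip()
--         if entry_kind == "result-int" and first.startswith(("result :", "let result")):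
--             result.append(block)
--         elif entry_kind == "main-io-int" and first.startswith(("main :", "let main")):
--             result.append(block)
--         elif entry_kind == "main-io-unit" and first.startswith(("main :", "let main")):
--             result.append(block)
--     return result
--
-- def split_blocks(text: str) -> list[str]:
--     blocks: list[str] = []
--     current: list[str] = []
--     for line in text.splitlines():
--         if line.strip() == "":
--             if current:
--                 blocks.append("\n".join(current))
--                 current = []
--         else:
--             current.append(line)
--     if current:
--         blocks.append("\n".join(current))
--     return blocks
-- ===== SOURCE B (Python) =====
-- def entry_blocks_by_kind(text: str, entry_kind: str) -> list[str]:
--     table = {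
--         "result-int": ("result :", "let result"),
--         "main-io-int": ("main :", "let main"),
--         "main-io-unit": ("main :", "let main"),
--     }
--     prefixes = table.get(entry_kind)
--     if prefixes is None:
--         return []
--     result: list[str] = []
--     current: list[str] = []
--     for line in text.splitlines() + [""]:
--         if line.strip():
--             current.append(line)
--         elif current:
--             if current[0].strip().startswith(prefixes):
--                 result.append("\n".join(current).strip())
--             current = []
--     return result
-- ===== Notes on version B (the rewrite author's own statement) =====
-- stated objective: simpler
-- what changed: A's helper pipeline (split_blocks building all blocks, then per-block re-splitting via top_level_lines and an if/elif chain of kind tests) is replaced by one prefix-table lookup up front (unknown kinds return [] immediately) and a single streaming pass over text.splitlines() that accumulates the current block and tests only its first line on each blank-line boundary.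
import Mathlib
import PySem

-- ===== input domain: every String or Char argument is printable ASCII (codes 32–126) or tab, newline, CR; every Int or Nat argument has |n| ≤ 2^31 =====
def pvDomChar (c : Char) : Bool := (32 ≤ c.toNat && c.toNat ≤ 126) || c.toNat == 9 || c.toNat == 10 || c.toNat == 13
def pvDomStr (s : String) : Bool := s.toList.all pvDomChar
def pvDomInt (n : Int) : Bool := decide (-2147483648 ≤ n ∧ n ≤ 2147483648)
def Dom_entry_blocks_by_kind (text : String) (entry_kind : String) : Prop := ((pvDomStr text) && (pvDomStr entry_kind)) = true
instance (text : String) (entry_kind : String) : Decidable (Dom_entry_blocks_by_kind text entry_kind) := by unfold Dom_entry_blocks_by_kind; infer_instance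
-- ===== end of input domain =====

-- B replaces A's helper pipeline (split_blocks + per-block top_level_lines + an if/elif chain)
-- by one prefix-table lookup followed by a single streaming pass over the lines; objective: simpler.

-- ===== PORT A =====
-- helper top_level_lines
def pyTopLevelLines (block : String) : List String :=
  (PySem.Str.splitlines block).filter
    (fun line => PySem.Str.strip line != "" &&
      !(PySem.Str.startswith line " " || PySem.Str.startswith line "\t"))

-- helper split_blocks
def pySplitBlocks (text : String) : List String :=
  let st := (PySem.Str.splitlines text).foldl
    (fun (st : List String × List String) line =>
      if PySem.Str.strip line = "" then
        if st.2 ≠ [] then (st.1 ++ [PySem.Str.join "\n" st.2], []) else st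
      else (st.1, st.2 ++ [line])) ([], [])
  if st.2 ≠ [] then st.1 ++ [PySem.Str.join "\n" st.2] else st.1

def entry_blocks_by_kind (text : String) (entry_kind : String) : List String :=
  let blocks := (pySplitBlocks text).filterMap
    (fun block => if PySem.Str.strip block ≠ "" then some (PySem.Str.strip block) else none)
  blocks.foldl (fun result block =>
    match pyTopLevelLines block with
    | [] => result
    | f :: _ =>
      let first := PySem.Str.strip f
      if entry_kind == "result-int" &&
          (PySem.Str.startswith first "result :" || PySem.Str.startswith first "let result") then
        result ++ [block]
      else if entry_kind == "main-io-int" &&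
          (PySem.Str.startswith first "main :" || PySem.Str.startswith first "let main") then
        result ++ [block]
      else if entry_kind == "main-io-unit" &&
          (PySem.Str.startswith first "main :" || PySem.Str.startswith first "let main") then
        result ++ [block]
      else result) []

-- ===== PORT B =====
def entry_blocks_by_kind_alt (text : String) (entry_kind : String) : List String :=
  let table : PySem.Dict String (String × String) := PySem.Dict.mk
    [("result-int", ("result :", "let result")),
     ("main-io-int", ("main :", "let main")),
     ("main-io-unit", ("main :", "let main"))]
  match table.get? entry_kind with
  | none => []
  | some pfx =>
    let st := ((PySem.Str.splitlines text) ++ [""]).foldl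
      (fun (st : List String × List String) line =>
        if PySem.Str.strip line ≠ "" then (st.1, st.2 ++ [line])
        else if st.2 ≠ [] then
          (if PySem.Str.startswith (PySem.Str.strip (st.2.headD "")) pfx.1 ||
              PySem.Str.startswith (PySem.Str.strip (st.2.headD "")) pfx.2 then
            st.1 ++ [PySem.Str.strip (PySem.Str.join "\n" st.2)]
          else st.1, [])
        else st) ([], [])
    st.1

-- ===== PRECONDITION & SPEC =====
def Spec_entry_blocks_by_kind (text : String) (entry_kind : String) (out : List String) : Prop := out = entry_blocks_by_kind_alt text entry_kind
instance (text : String) (entry_kind : String) (out : List String) : Decidable (Spec_entry_blocks_by_kind text entry_kind out) := by unfold Spec_entry_blocks_by_kind; infer_instance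

-- ===== CLAIM (what is proved, stated in full; the proofs are below) =====
def Claim_equal_entry_blocks_by_kind : Prop := ∀ (text : String) (entry_kind : String), Dom_entry_blocks_by_kind text entry_kind → Spec_entry_blocks_by_kind text entry_kind (entry_blocks_by_kind text entry_kind)

-- ===== LEMMAS AND PROOFS =====

def pvIsB : Char → Bool := fun c =>
  have n := c.toNat;
  decide (n = 10) || decide (n = 13) || decide (n = 11) || decide (n = 12) || decide (n = 28) || decide (n = 29) ||
          decide (n = 30) ||
        decide (n = 133) ||
      decide (n = 8232) ||
    decide (n = 8233)

def pvBF (l : List Char) : Prop := ∀ c ∈ l, pvIsB c = false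
def pvNB (l : List Char) : Prop := PySem.Chars.strip l ≠ []

theorem pv_splitlines_eq_go (s : List Char) :
    PySem.Chars.splitlines s = PySem.Chars.splitlines.go pvIsB s [] [] := rfl

theorem pv_go_nil (cur : List Char) (acc : List (List Char)) :
    PySem.Chars.splitlines.go pvIsB [] cur acc
      = if cur.isEmpty then acc.reverse else (cur.reverse :: acc).reverse := by
  rw [PySem.Chars.splitlines.go.eq_def]

theorem pv_go_keep {c : Char} (hc : pvIsB c = false) (rest cur : List Char) (acc : List (List Char)) :
    PySem.Chars.splitlines.go pvIsB (c :: rest) cur acc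
      = PySem.Chars.splitlines.go pvIsB rest (c :: cur) acc := by
  rw [PySem.Chars.splitlines.go.eq_def]
  split
  · simp_all
  · rename_i h; exfalso; injection h with h1 h2; subst h1; revert hc; decide
  · rename_i h heq; injection heq with h1 h2; subst h1; subst h2; simp [hc]

theorem pv_go_nl (rest cur : List Char) (acc : List (List Char)) :
    PySem.Chars.splitlines.go pvIsB ('\n' :: rest) cur acc
      = PySem.Chars.splitlines.go pvIsB rest [] (cur.reverse :: acc) := by
  rw [PySem.Chars.splitlines.go.eq_def]
  split
  · simp_all
  · rename_i h; simp at h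
  · rename_i h heq; injection heq with h1 h2; subst h1; subst h2
    simp [show pvIsB '\n' = true by decide]

theorem pv_go_crlf (rest cur : List Char) (acc : List (List Char)) :
    PySem.Chars.splitlines.go pvIsB ('\x0d' :: '\n' :: rest) cur acc
      = PySem.Chars.splitlines.go pvIsB rest [] (cur.reverse :: acc) := rfl

theorem pv_go_break {c : Char} {rest : List Char}
    (hc : pvIsB c = true) (hne : ∀ rest', c = '\x0d' → rest = '\n' :: rest' → False)
    (cur : List Char) (acc : List (List Char)) :
    PySem.Chars.splitlines.go pvIsB (c :: rest) cur acc
      = PySem.Chars.splitlines.go pvIsB rest [] (cur.reverse :: acc) := by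
  rw [PySem.Chars.splitlines.go.eq_def]
  split
  · simp_all
  · rename_i h; injection h with h1 h2; exact ((hne _ h1 h2).elim)
  · rename_i h heq; injection heq with h1 h2; subst h1; subst h2; simp [hc]

theorem pv_go_acc (s cur : List Char) : ∀ acc,
    PySem.Chars.splitlines.go pvIsB s cur acc
      = acc.reverse ++ PySem.Chars.splitlines.go pvIsB s cur [] := by
  refine PySem.Chars.splitlines.go.induct pvIsB
    (fun s cur _ => ∀ acc, PySem.Chars.splitlines.go pvIsB s cur acc
      = acc.reverse ++ PySem.Chars.splitlines.go pvIsB s cur []) ?_ ?_ ?_ ?_ ?_ s cur []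
  · intro cur acc h acc'; rw [pv_go_nil, pv_go_nil]; simp [h]
  · intro cur acc h acc'; rw [pv_go_nil, pv_go_nil]; simp [h]
  · intro rest cur acc ih acc'
    rw [pv_go_crlf, pv_go_crlf, ih, ih [cur.reverse]]; simp
  · intro c rest cur acc hne hc ih acc'
    rw [pv_go_break hc hne, pv_go_break hc hne, ih, ih [cur.reverse]]; simp
  · intro c rest cur acc hne hc ih acc'
    rw [pv_go_keep (by simpa using hc), pv_go_keep (by simpa using hc), ih]

theorem pv_go_bf_prefix {x : List Char} (hx : pvBF x) (s cur : List Char) (acc : List (List Char)) :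
    PySem.Chars.splitlines.go pvIsB (x ++ s) cur acc
      = PySem.Chars.splitlines.go pvIsB s (x.reverse ++ cur) acc := by
  induction x generalizing cur with
  | nil => simp
  | cons c t ih =>
      rw [List.cons_append, pv_go_keep (hx c (by simp)), ih (fun d hd => hx d (by simp [hd]))]
      simp

theorem pv_splitlines_bf_ne_nil {x : List Char} (hx : pvBF x) (hne : x ≠ []) :
    PySem.Chars.splitlines x = [x] := by
  rw [pv_splitlines_eq_go, show x = x ++ [] by simp, pv_go_bf_prefix hx, pv_go_nil]
  simp [hne]

theorem pv_splitlines_append_nl {x : List Char} (hx : pvBF x) (y : List Char) :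
    PySem.Chars.splitlines (x ++ '\n' :: y) = x :: PySem.Chars.splitlines y := by
  rw [pv_splitlines_eq_go, pv_go_bf_prefix hx, pv_go_nl, pv_go_acc]
  simp [pv_splitlines_eq_go]

theorem pv_splitlines_bf {s : List Char} : ∀ l ∈ PySem.Chars.splitlines s, pvBF l := by
  rw [pv_splitlines_eq_go]
  have H : ∀ (s cur : List Char) (acc : List (List Char)),
      (∀ l ∈ acc, pvBF l) → pvBF cur →
      ∀ l ∈ PySem.Chars.splitlines.go pvIsB s cur acc, pvBF l := by
    intro s cur acc
    induction s, cur, acc using PySem.Chars.splitlines.go.induct pvIsB with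
    | case1 cur acc h =>
        intro hacc hcur
        rw [pv_go_nil]; simp [h]
        intro l hl; exact hacc l (by simpa using hl)
    | case2 cur acc h =>
        intro hacc hcur
        rw [pv_go_nil]; simp [h]
        intro l hl
        rcases hl with h1 | h2
        · exact hacc l h1
        · subst h2; intro c hc; exact hcur c (List.mem_reverse.1 hc)
    | case3 rest cur acc ih =>
        intro hacc hcur
        rw [pv_go_crlf]
        exact ih (by
          intro l hl
          rcases List.mem_cons.1 hl with rfl | hl
          · intro c hc; exact hcur c (List.mem_reverse.1 hc)
          · exact hacc l hl) (by intro c hc; simp at hc)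
    | case4 c rest cur acc hne hc ih =>
        intro hacc hcur
        rw [pv_go_break hc hne]
        exact ih (by
          intro l hl
          rcases List.mem_cons.1 hl with rfl | hl
          · intro d hd; exact hcur d (List.mem_reverse.1 hd)
          · exact hacc l hl) (by intro d hd; simp at hd)
    | case5 c rest cur acc hne hc ih =>
        intro hacc hcur
        rw [pv_go_keep (by simpa using hc)]
        exact ih hacc (by
          intro d hd
          rcases List.mem_cons.1 hd with rfl | hd
          · simpa using hc
          · exact hcur d hd)
  exact H s [] [] (by simp) (by intro c hc; simp at hc)

-- strip toolkit
theorem pv_nb_iff {x : List Char} :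
    pvNB x ↔ ∃ c ∈ x, PySem.Chars.isspace c = false := by
  constructor
  · intro h
    by_contra hall
    have : ∀ c ∈ x, PySem.Chars.isspace c = true := by
      intro c hc; cases hh : PySem.Chars.isspace c
      · exact absurd ⟨c, hc, hh⟩ hall
      · rfl
    have h1 : PySem.Chars.lstrip x = [] := by
      simp [PySem.Chars.lstrip, List.dropWhile_eq_nil_iff]; exact this
    exact h (by simp [PySem.Chars.strip, h1, PySem.Chars.rstrip])
  · rintro ⟨c, hc, hns⟩
    have h1 : PySem.Chars.lstrip x ≠ [] := by
      simp [PySem.Chars.lstrip, List.dropWhile_eq_nil_iff]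
      exact ⟨c, hc, by simp [hns]⟩
    obtain ⟨d, t, hdt⟩ := List.exists_cons_of_ne_nil h1
    have h1' : List.dropWhile PySem.Chars.isspace x ≠ [] := by simpa [PySem.Chars.lstrip] using h1
    have hdt' : List.dropWhile PySem.Chars.isspace x = d :: t := by simpa [PySem.Chars.lstrip] using hdt
    have hd : PySem.Chars.isspace d = false := by
      have hh := List.head_dropWhile_not (l := x) PySem.Chars.isspace h1'
      revert hh
      generalize List.dropWhile PySem.Chars.isspace x = z at h1' hdt'
      subst hdt'
      simp
    intro hstrip
    have h2 : List.dropWhile PySem.Chars.isspace ((d :: t).reverse) = [] := by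
      have h3 := hstrip
      rw [PySem.Chars.strip, hdt, PySem.Chars.rstrip] at h3
      simpa using h3
    rw [List.dropWhile_eq_nil_iff] at h2
    have h4 := h2 d (by simp)
    simp [hd] at h4

theorem pv_rstrip_append {x y : List Char} (hy : ∃ c ∈ y, PySem.Chars.isspace c = false) :
    PySem.Chars.rstrip (x ++ y) = x ++ PySem.Chars.rstrip y := by
  have h1 : List.dropWhile PySem.Chars.isspace y.reverse ≠ [] := by
    simp [List.dropWhile_eq_nil_iff]
    obtain ⟨c, hc, hns⟩ := hy
    exact ⟨c, by simpa using hc, by simp [hns]⟩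
  rw [PySem.Chars.rstrip, PySem.Chars.rstrip, List.reverse_append, List.dropWhile_append]
  simp [List.isEmpty_iff, h1]

theorem pv_lstrip_append {x y : List Char} (hx : ∃ c ∈ x, PySem.Chars.isspace c = false) :
    PySem.Chars.lstrip (x ++ y) = PySem.Chars.lstrip x ++ y := by
  have h1 : List.dropWhile PySem.Chars.isspace x ≠ [] := by
    simp [List.dropWhile_eq_nil_iff]
    obtain ⟨c, hc, hns⟩ := hx
    exact ⟨c, hc, by simp [hns]⟩
  rw [PySem.Chars.lstrip, PySem.Chars.lstrip, List.dropWhile_append]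
  simp [List.isEmpty_iff, h1]

theorem pv_head_dropWhile {p : Char → Bool} {x : List Char} {d : Char} {t : List Char}
    (h : List.dropWhile p x = d :: t) : p d = false := by
  have h1' : List.dropWhile p x ≠ [] := by simp [h]
  have hh := List.head_dropWhile_not (l := x) p h1'
  revert hh
  generalize List.dropWhile p x = z at h1' h
  subst h
  simp

theorem pv_dropWhile_idem (p : Char → Bool) (x : List Char) :
    List.dropWhile p (List.dropWhile p x) = List.dropWhile p x := by
  cases h : List.dropWhile p x with
  | nil => rfl
  | cons d t => rw [List.dropWhile_cons]; simp [pv_head_dropWhile h]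

theorem pv_rstrip_cons {c : Char} (hc : PySem.Chars.isspace c = false) (t : List Char) :
    PySem.Chars.rstrip (c :: t) = c :: PySem.Chars.rstrip t := by
  have h0 : (c :: t) = [c] ++ t := rfl
  rw [h0]
  by_cases ht : ∃ d ∈ t, PySem.Chars.isspace d = false
  · rw [pv_rstrip_append ht]; rfl
  · have hall : ∀ d ∈ t, PySem.Chars.isspace d = true := by
      intro d hd; cases hh : PySem.Chars.isspace d
      · exact absurd ⟨d, hd, hh⟩ ht
      · rfl
    have h1 : PySem.Chars.rstrip t = [] := by
      rw [PySem.Chars.rstrip, List.reverse_eq_nil_iff, List.dropWhile_eq_nil_iff]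
      intro a ha; exact hall a (List.mem_reverse.1 ha)
    rw [h1, PySem.Chars.rstrip]
    simp [List.dropWhile_append, List.dropWhile_eq_nil_iff, hc]
    intro a ha hf; exact fun b hb => hall b hb

theorem pv_lstrip_cons_of_not_space {c : Char} (hc : PySem.Chars.isspace c = false) (t : List Char) :
    PySem.Chars.lstrip (c :: t) = c :: t := by
  rw [PySem.Chars.lstrip, List.dropWhile_cons]; simp [hc]

theorem pv_strip_cases (x : List Char) :
    PySem.Chars.strip x = [] ∨
    ∃ c t, PySem.Chars.strip x = c :: t ∧ PySem.Chars.isspace c = false := by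
  cases hdt : PySem.Chars.lstrip x with
  | nil => left; simp [PySem.Chars.strip, hdt, PySem.Chars.rstrip]
  | cons d t =>
      right
      have hd : PySem.Chars.isspace d = false :=
        pv_head_dropWhile (by simpa [PySem.Chars.lstrip] using hdt)
      exact ⟨d, PySem.Chars.rstrip t, by simp [PySem.Chars.strip, hdt, pv_rstrip_cons hd], hd⟩

theorem pv_rstrip_idem (y : List Char) :
    PySem.Chars.rstrip (PySem.Chars.rstrip y) = PySem.Chars.rstrip y := by
  rw [PySem.Chars.rstrip, PySem.Chars.rstrip]
  congr 1
  simp only [List.reverse_reverse]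
  exact pv_dropWhile_idem _ _

theorem pv_lstrip_strip (x : List Char) :
    PySem.Chars.lstrip (PySem.Chars.strip x) = PySem.Chars.strip x := by
  rcases pv_strip_cases x with h | ⟨c, t, h, hc⟩
  · simp [h, PySem.Chars.lstrip]
  · rw [h, pv_lstrip_cons_of_not_space hc]

theorem pv_strip_strip (x : List Char) :
    PySem.Chars.strip (PySem.Chars.strip x) = PySem.Chars.strip x := by
  conv_lhs => rw [PySem.Chars.strip]
  rw [pv_lstrip_strip, PySem.Chars.strip, pv_rstrip_idem, ← PySem.Chars.strip]

theorem pv_strip_lstrip (x : List Char) :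
    PySem.Chars.strip (PySem.Chars.lstrip x) = PySem.Chars.strip x := by
  rw [PySem.Chars.strip, PySem.Chars.strip]
  congr 1
  exact pv_dropWhile_idem _ _

def pvE : List (List Char) → List (List Char)
  | [] => []
  | [l] => [PySem.Chars.rstrip l]
  | l :: l' :: ls => l :: pvE (l' :: ls)

theorem pv_nb_ne_nil {l : List Char} (h : pvNB l) : l ≠ [] := by
  rintro rfl; exact h rfl

theorem pv_rstrip_ne_nil {l : List Char} (h : pvNB l) : PySem.Chars.rstrip l ≠ [] := by
  obtain ⟨c, hc, hns⟩ := pv_nb_iff.1 h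
  intro hr
  rw [PySem.Chars.rstrip, List.reverse_eq_nil_iff, List.dropWhile_eq_nil_iff] at hr
  have := hr c (by simpa using hc)
  simp [hns] at this

theorem pv_lstrip_ne_nil {l : List Char} (h : pvNB l) : PySem.Chars.lstrip l ≠ [] := by
  obtain ⟨c, hc, hns⟩ := pv_nb_iff.1 h
  intro hr
  rw [PySem.Chars.lstrip, List.dropWhile_eq_nil_iff] at hr
  have := hr c hc
  simp [hns] at this

theorem pv_bf_lstrip {l : List Char} (h : pvBF l) : pvBF (PySem.Chars.lstrip l) := by
  intro c hc
  exact h c ((List.dropWhile_sublist _).mem hc)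

theorem pv_bf_rstrip {l : List Char} (h : pvBF l) : pvBF (PySem.Chars.rstrip l) := by
  intro c hc
  rw [PySem.Chars.rstrip, List.mem_reverse] at hc
  exact h c (by simpa using (List.dropWhile_sublist _).mem hc)

theorem pv_join_cons (l : List Char) {ls : List (List Char)} (h : ls ≠ []) :
    PySem.Chars.join ['\n'] (l :: ls) = l ++ '\n' :: PySem.Chars.join ['\n'] ls := by
  cases ls with
  | nil => exact absurd rfl h
  | cons l' ls' => rw [PySem.Chars.join_cons_cons]; simp

theorem pv_mem_join_head {c : Char} {l : List Char} (hc : c ∈ l) (ls : List (List Char)) :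
    c ∈ PySem.Chars.join ['\n'] (l :: ls) := by
  cases ls with
  | nil => simpa [PySem.Chars.join_singleton] using hc
  | cons l' ls' => rw [pv_join_cons l (by simp)]; simp [hc]

theorem pv_rstrip_join : ∀ (ls : List (List Char)), (∀ l ∈ ls, pvNB l) → ls ≠ [] →
    PySem.Chars.rstrip (PySem.Chars.join ['\n'] ls) = PySem.Chars.join ['\n'] (pvE ls)
  | [], _, h => absurd rfl h
  | [l], hnb, _ => by
      rw [PySem.Chars.join_singleton, pvE, PySem.Chars.join_singleton]
  | l :: l' :: ls, hnb, _ => by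
      have hnb' : ∀ m ∈ l' :: ls, pvNB m := fun m hm => hnb m (by simp [hm])
      obtain ⟨c, hc, hns⟩ := pv_nb_iff.1 (hnb' l' (by simp))
      rw [pv_join_cons l (by simp)]
      have hw : ∃ d ∈ PySem.Chars.join ['\n'] (l' :: ls), PySem.Chars.isspace d = false :=
        ⟨c, pv_mem_join_head hc ls, hns⟩
      have h1 : l ++ '\n' :: PySem.Chars.join ['\n'] (l' :: ls)
          = (l ++ ['\n']) ++ PySem.Chars.join ['\n'] (l' :: ls) := by simp
      rw [h1, pv_rstrip_append hw, pv_rstrip_join (l' :: ls) hnb' (by simp)]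
      have h2 : pvE (l' :: ls) ≠ [] := by
        cases ls with
        | nil => simp [pvE]
        | cons a b => simp [pvE]
      rw [pvE, pv_join_cons l h2]
      simp

theorem pv_splitlines_join : ∀ (ls : List (List Char)), ls ≠ [] →
    (∀ l ∈ ls, l ≠ [] ∧ pvBF l) →
    PySem.Chars.splitlines (PySem.Chars.join ['\n'] ls) = ls
  | [], h, _ => absurd rfl h
  | [l], _, hl => by
      rw [PySem.Chars.join_singleton]
      exact pv_splitlines_bf_ne_nil (hl l (by simp)).2 (hl l (by simp)).1
  | l :: l' :: ls, _, hl => by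
      rw [pv_join_cons l (by simp), pv_splitlines_append_nl (hl l (by simp)).2,
        pv_splitlines_join (l' :: ls) (by simp) (fun m hm => hl m (by simp [hm]))]

theorem pv_strip_join (c0 : List Char) (rest : List (List Char))
    (h : ∀ l ∈ c0 :: rest, pvNB l) :
    PySem.Chars.strip (PySem.Chars.join ['\n'] (c0 :: rest))
      = PySem.Chars.join ['\n'] (pvE (PySem.Chars.lstrip c0 :: rest)) := by
  cases rest with
  | nil =>
      rw [PySem.Chars.join_singleton, pvE, PySem.Chars.join_singleton, PySem.Chars.strip]
  | cons l' ls =>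
      obtain ⟨c, hc, hns⟩ := pv_nb_iff.1 (h c0 (by simp))
      rw [PySem.Chars.strip, pv_join_cons c0 (by simp),
        show c0 ++ '\n' :: PySem.Chars.join ['\n'] (l' :: ls)
          = c0 ++ ('\n' :: PySem.Chars.join ['\n'] (l' :: ls)) from rfl,
        pv_lstrip_append ⟨c, hc, hns⟩,
        show PySem.Chars.lstrip c0 ++ '\n' :: PySem.Chars.join ['\n'] (l' :: ls)
          = PySem.Chars.join ['\n'] (PySem.Chars.lstrip c0 :: l' :: ls) from
            (pv_join_cons _ (by simp)).symm]
      apply pv_rstrip_join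
      · intro m hm
        rcases List.mem_cons.1 hm with rfl | hm
        · intro hs; rw [pv_strip_lstrip] at hs; exact h c0 (by simp) hs
        · exact h m (by simp [hm])
      · simp

theorem pv_E_elems : ∀ (ls : List (List Char)), (∀ l ∈ ls, pvNB l ∧ pvBF l) →
    ∀ m ∈ pvE ls, m ≠ [] ∧ pvBF m
  | [], _, m, hm => by simp [pvE] at hm
  | [l], h, m, hm => by
      rw [pvE] at hm
      simp at hm
      subst hm
      exact ⟨pv_rstrip_ne_nil (h l (by simp)).1, pv_bf_rstrip (h l (by simp)).2⟩
  | l :: l' :: ls, h, m, hm => by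
      rw [pvE] at hm
      rcases List.mem_cons.1 hm with rfl | hm
      · exact ⟨pv_nb_ne_nil (h m (by simp)).1, (h m (by simp)).2⟩
      · exact pv_E_elems (l' :: ls) (fun a ha => h a (by simp [ha])) m hm

theorem pv_K2 (c0 : List Char) (rest : List (List Char))
    (h : ∀ l ∈ c0 :: rest, pvNB l ∧ pvBF l) :
    PySem.Chars.splitlines (PySem.Chars.strip (PySem.Chars.join ['\n'] (c0 :: rest)))
      = pvE (PySem.Chars.lstrip c0 :: rest) := by
  rw [pv_strip_join c0 rest (fun l hl => (h l hl).1)]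
  apply pv_splitlines_join
  · cases rest with
    | nil => simp [pvE]
    | cons a b => simp [pvE]
  · apply pv_E_elems
    intro l hl
    rcases List.mem_cons.1 hl with rfl | hl
    · constructor
      · intro hs; rw [pv_strip_lstrip] at hs; exact (h c0 (by simp)).1 hs
      · exact pv_bf_lstrip (h c0 (by simp)).2
    · exact h l (by simp [hl])

theorem pv_K1 (c0 : List Char) (rest : List (List Char))
    (h : ∀ l ∈ c0 :: rest, pvNB l) :
    PySem.Chars.strip (PySem.Chars.join ['\n'] (c0 :: rest)) ≠ [] := by
  rw [pv_strip_join c0 rest h]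
  cases rest with
  | nil =>
      rw [pvE, PySem.Chars.join_singleton]
      rw [show PySem.Chars.rstrip (PySem.Chars.lstrip c0) = PySem.Chars.strip c0 from rfl]
      exact h c0 (by simp)
  | cons l' ls =>
      rw [pvE, pv_join_cons _ (by cases ls <;> simp [pvE])]
      simp

theorem pv_K3 (c0 : List Char) (rest : List (List Char))
    (h : ∀ l ∈ c0 :: rest, pvNB l) :
    ∃ d t' tl, pvE (PySem.Chars.lstrip c0 :: rest) = (d :: t') :: tl ∧
      PySem.Chars.isspace d = false ∧
      PySem.Chars.strip (d :: t') = PySem.Chars.strip c0 := by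
  cases rest with
  | nil =>
      have h0 : PySem.Chars.rstrip (PySem.Chars.lstrip c0) = PySem.Chars.strip c0 := rfl
      rcases pv_strip_cases c0 with hs | ⟨d, t, hdt, hd⟩
      · exact absurd hs (h c0 (by simp))
      · refine ⟨d, t, [], ?_, hd, ?_⟩
        · rw [pvE, h0, hdt]
        · rw [← hdt, pv_strip_strip]
  | cons l' ls =>
      cases hdt : PySem.Chars.lstrip c0 with
      | nil => exact absurd hdt (pv_lstrip_ne_nil (h c0 (by simp)))
      | cons d t =>
          have hd : PySem.Chars.isspace d = false :=
            pv_head_dropWhile (by simpa [PySem.Chars.lstrip] using hdt)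
          refine ⟨d, t, pvE (l' :: ls), by rw [pvE], hd, ?_⟩
          
          rw [← hdt, pv_strip_lstrip]

def pvCond (p : String × String) (first : String) : Bool :=
  PySem.Str.startswith first p.1 || PySem.Str.startswith first p.2

def pvStepA (p : String × String) (result : List String) (block : String) : List String :=
  match pyTopLevelLines block with
  | [] => result
  | f :: _ => if pvCond p (PySem.Str.strip f) then result ++ [block] else result

def pvStepSB (st : List String × List String) (line : String) : List String × List String :=
  if PySem.Str.strip line = "" then
    if st.2 ≠ [] then (st.1 ++ [PySem.Str.join "\n" st.2], []) else st
  else (st.1, st.2 ++ [line])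

def pvFlush (st : List String × List String) : List String :=
  if st.2 ≠ [] then st.1 ++ [PySem.Str.join "\n" st.2] else st.1

def pvStripF (bs : List String) : List String :=
  bs.filterMap (fun block => if PySem.Str.strip block ≠ "" then some (PySem.Str.strip block) else none)

def pvStepB (p : String × String) (st : List String × List String) (line : String) : List String × List String :=
  if PySem.Str.strip line ≠ "" then (st.1, st.2 ++ [line])
  else if st.2 ≠ [] then
    (if pvCond p (PySem.Str.strip (st.2.headD ""))
      then st.1 ++ [PySem.Str.strip (PySem.Str.join "\n" st.2)] else st.1, [])
  else st

theorem pv_str_ne_empty_iff (l : List Char) : (String.ofList l ≠ "") ↔ l ≠ [] := by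
  constructor
  · intro h hl; exact h (by rw [hl])
  · intro h hc; exact h (by simpa using congrArg String.toList hc)

theorem pv_strip_toList (s : String) :
    PySem.Str.strip s = String.ofList (PySem.Chars.strip s.toList) := rfl

theorem pv_nb_str {l : String} (h : PySem.Str.strip l ≠ "") : pvNB l.toList := by
  intro hc
  exact h (by rw [pv_strip_toList, hc])

theorem pv_join_toList (cur : List String) :
    (PySem.Str.join "\n" cur).toList = PySem.Chars.join ['\n'] (cur.map String.toList) := by
  simp [PySem.Str.join]

-- per-block facts at String level
theorem pv_KS1 (c0 : String) (cs : List String)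
    (h : ∀ l ∈ c0 :: cs, PySem.Str.strip l ≠ "") :
    PySem.Str.strip (PySem.Str.join "\n" (c0 :: cs)) ≠ "" := by
  rw [pv_strip_toList, pv_join_toList]
  refine (pv_str_ne_empty_iff _).2 ?_
  simp only [List.map_cons]
  exact pv_K1 _ _ (by
    intro l hl
    rcases List.mem_cons.1 hl with rfl | hl
    · exact pv_nb_str (h c0 (by simp))
    · obtain ⟨m, hm, rfl⟩ := List.mem_map.1 hl
      exact pv_nb_str (h m (by simp [hm])))

theorem pv_KS2 (c0 : String) (cs : List String)
    (h : ∀ l ∈ c0 :: cs, PySem.Str.strip l ≠ "" ∧ pvBF l.toList) :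
    ∃ f tl, pyTopLevelLines (PySem.Str.strip (PySem.Str.join "\n" (c0 :: cs))) = f :: tl ∧
      PySem.Str.strip f = PySem.Str.strip c0 := by
  have hnb : ∀ l ∈ (c0.toList :: cs.map String.toList), pvNB l ∧ pvBF l := by
    intro l hl
    rcases List.mem_cons.1 hl with rfl | hl
    · exact ⟨pv_nb_str (h c0 (by simp)).1, (h c0 (by simp)).2⟩
    · obtain ⟨m, hm, rfl⟩ := List.mem_map.1 hl
      exact ⟨pv_nb_str (h m (by simp [hm])).1, (h m (by simp [hm])).2⟩
  obtain ⟨d, t', tl, hE, hd, hstrip⟩ := pv_K3 c0.toList (cs.map String.toList)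
      (fun l hl => (hnb l hl).1)
  have hb : (PySem.Str.strip (PySem.Str.join "\n" (c0 :: cs))).toList
      = PySem.Chars.strip (PySem.Chars.join ['\n'] (c0.toList :: cs.map String.toList)) := by
    rw [pv_strip_toList, String.toList_ofList, pv_join_toList]; simp
  have hsl : PySem.Str.splitlines (PySem.Str.strip (PySem.Str.join "\n" (c0 :: cs)))
      = List.map String.ofList ((d :: t') :: tl) := by
    rw [PySem.Str.splitlines, hb, pv_K2 _ _ hnb, hE]
  have h1 : PySem.Str.strip (String.ofList (d :: t')) != "" := by
    simp only [bne_iff_ne, ne_eq]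
    rw [pv_strip_toList, String.toList_ofList, hstrip]
    exact (pv_str_ne_empty_iff _).2 (pv_nb_str (h c0 (by simp)).1)
  have hfil : pyTopLevelLines (PySem.Str.strip (PySem.Str.join "\n" (c0 :: cs)))
      = String.ofList (d :: t') ::
        (List.map String.ofList tl).filter
          (fun line => PySem.Str.strip line != "" &&
            !(PySem.Str.startswith line " " || PySem.Str.startswith line "\t")) := by
    rw [pyTopLevelLines, hsl, List.map_cons, List.filter_cons]
    simp [h1]
    constructor
    · simp [PySem.Chars.startswith, List.isPrefixOf]
      intro hd'; rw [← hd'] at hd; exact absurd hd (by decide)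
    · simp [PySem.Chars.startswith, List.isPrefixOf]
      intro hd'; rw [← hd'] at hd; exact absurd hd (by decide)
  refine ⟨String.ofList (d :: t'), _, hfil, ?_⟩
  rw [pv_strip_toList, String.toList_ofList, hstrip, ← pv_strip_toList]

theorem pv_stepSB_shift : ∀ (ls : List String) (bs cur : List String),
    List.foldl pvStepSB (bs, cur) ls
      = (bs ++ (List.foldl pvStepSB ([], cur) ls).1, (List.foldl pvStepSB ([], cur) ls).2)
  | [], bs, cur => by simp
  | l :: ls, bs, cur => by
      rw [List.foldl_cons, List.foldl_cons]
      by_cases h1 : PySem.Str.strip l = ""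
      · by_cases h2 : cur ≠ []
        · rw [show pvStepSB (bs, cur) l = (bs ++ [PySem.Str.join "\n" cur], []) by
            simp [pvStepSB, h1, h2],
            show pvStepSB ([], cur) l = ([] ++ [PySem.Str.join "\n" cur], []) by
            simp [pvStepSB, h1, h2]]
          rw [pv_stepSB_shift ls (bs ++ [PySem.Str.join "\n" cur]) [],
            pv_stepSB_shift ls ([] ++ [PySem.Str.join "\n" cur]) []]
          simp
        · rw [show pvStepSB (bs, cur) l = (bs, cur) by simp [pvStepSB, h1, h2],
            show pvStepSB ([], cur) l = ([], cur) by simp [pvStepSB, h1, h2]]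
          exact pv_stepSB_shift ls bs cur
      · rw [show pvStepSB (bs, cur) l = (bs, cur ++ [l]) by simp [pvStepSB, h1],
          show pvStepSB ([], cur) l = ([], cur ++ [l]) by simp [pvStepSB, h1]]
        exact pv_stepSB_shift ls bs (cur ++ [l])

theorem pv_stepA_shift (p : String × String) : ∀ (bs : List String) (res : List String),
    List.foldl (pvStepA p) res bs = res ++ List.foldl (pvStepA p) [] bs
  | [], res => by simp
  | b :: bs, res => by
      rw [List.foldl_cons, List.foldl_cons]
      cases htl : pyTopLevelLines b with
      | nil =>
          rw [show pvStepA p res b = res by simp [pvStepA, htl],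
            show pvStepA p [] b = [] by simp [pvStepA, htl]]
          exact pv_stepA_shift p bs res
      | cons f t =>
          by_cases hc : pvCond p (PySem.Str.strip f)
          · rw [show pvStepA p res b = res ++ [b] by simp [pvStepA, htl, hc],
              show pvStepA p [] b = [] ++ [b] by simp [pvStepA, htl, hc]]
            rw [pv_stepA_shift p bs (res ++ [b]), pv_stepA_shift p bs ([] ++ [b])]
            simp
          · rw [show pvStepA p res b = res by simp [pvStepA, htl, hc],
              show pvStepA p [] b = [] by simp [pvStepA, htl, hc]]
            exact pv_stepA_shift p bs res

theorem pv_block (p : String × String) (c0 : String) (cs : List String)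
    (h : ∀ l ∈ c0 :: cs, PySem.Str.strip l ≠ "" ∧ pvBF l.toList) :
    List.foldl (pvStepA p) [] (pvStripF [PySem.Str.join "\n" (c0 :: cs)])
      = if pvCond p (PySem.Str.strip c0)
          then [PySem.Str.strip (PySem.Str.join "\n" (c0 :: cs))] else [] := by
  have h1 := pv_KS1 c0 cs (fun l hl => (h l hl).1)
  obtain ⟨f, tl, hfil, hf⟩ := pv_KS2 c0 cs h
  rw [pvStripF]
  simp only [List.filterMap_cons, List.filterMap_nil, h1, if_pos, ne_eq, not_false_iff]
  rw [List.foldl_cons, List.foldl_nil, pvStepA, hfil]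
  simp only [hf, List.nil_append]

theorem pv_flush_shift (bs st1 : List String) (st2 : List String) :
    pvFlush (bs ++ st1, st2) = bs ++ pvFlush (st1, st2) := by
  simp only [pvFlush]
  split <;> simp

theorem pv_stripF_append (a b : List String) :
    pvStripF (a ++ b) = pvStripF a ++ pvStripF b := by
  simp [pvStripF, List.filterMap_append]


theorem pv_strip_empty : PySem.Str.strip "" = "" := rfl

theorem pv_main (p : String × String) : ∀ (ls : List String),
    (∀ l ∈ ls, pvBF l.toList) →
    ∀ (cur res : List String), (∀ l ∈ cur, PySem.Str.strip l ≠ "" ∧ pvBF l.toList) →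
    (List.foldl (pvStepB p) (res, cur) (ls ++ [""])).1
      = res ++ List.foldl (pvStepA p) [] (pvStripF (pvFlush (List.foldl pvStepSB ([], cur) ls)))
  | [], _, cur, res, hcur => by
      simp only [List.nil_append, List.foldl_cons, List.foldl_nil]
      rw [show pvStepB p (res, cur) "" =
          (if cur ≠ [] then
            (if pvCond p (PySem.Str.strip (cur.headD ""))
              then res ++ [PySem.Str.strip (PySem.Str.join "\n" cur)] else res, [])
          else (res, cur)) by simp [pvStepB, pv_strip_empty]]
      cases cur with
      | nil => simp [pvFlush, pvStripF]
      | cons c0 cs =>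
          simp only [ne_eq, reduceCtorEq, not_false_iff, if_pos, List.headD_cons]
          rw [show pvFlush ([], c0 :: cs)
              = [PySem.Str.join "\n" (c0 :: cs)] by simp [pvFlush]]
          rw [pv_block p c0 cs hcur]
          by_cases hc : pvCond p (PySem.Str.strip c0)
          · simp [hc]
          · simp [hc]
  | l :: ls, hls, cur, res, hcur => by
      have hls' : ∀ m ∈ ls, pvBF m.toList := fun m hm => hls m (by simp [hm])
      rw [List.cons_append, List.foldl_cons, List.foldl_cons]
      by_cases h1 : PySem.Str.strip l = ""
      · rw [show pvStepB p (res, cur) l =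
            (if cur ≠ [] then
              (if pvCond p (PySem.Str.strip (cur.headD ""))
                then res ++ [PySem.Str.strip (PySem.Str.join "\n" cur)] else res, [])
            else (res, cur)) by simp [pvStepB, h1]]
        cases cur with
        | nil =>
            rw [if_neg (by simp)]
            rw [show pvStepSB ([], ([] : List String)) l = ([], []) by simp [pvStepSB, h1]]
            exact pv_main p ls hls' [] res (by simp)
        | cons c0 cs =>
            simp only [ne_eq, reduceCtorEq, not_false_iff, if_pos, List.headD_cons]
            rw [show pvStepSB ([], c0 :: cs) l = ([PySem.Str.join "\n" (c0 :: cs)], []) by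
              simp [pvStepSB, h1]]
            rw [pv_stepSB_shift ls [PySem.Str.join "\n" (c0 :: cs)] []]
            rw [show ([PySem.Str.join "\n" (c0 :: cs)] ++ (List.foldl pvStepSB ([], []) ls).1,
                (List.foldl pvStepSB ([], []) ls).2)
              = ([PySem.Str.join "\n" (c0 :: cs)] ++ (List.foldl pvStepSB ([], []) ls).1,
                ((List.foldl pvStepSB ([], []) ls).1, (List.foldl pvStepSB ([], []) ls).2).2) from rfl]
            conv_rhs => rw [pv_flush_shift, pv_stripF_append, List.foldl_append]
            rw [pv_stepA_shift p (pvStripF (pvFlush ((List.foldl pvStepSB ([], []) ls).1,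
                (List.foldl pvStepSB ([], []) ls).2)))]
            rw [pv_block p c0 cs hcur]
            by_cases hc : pvCond p (PySem.Str.strip c0)
            · rw [if_pos hc, if_pos hc,
                pv_main p ls hls' [] (res ++ [PySem.Str.strip (PySem.Str.join "\n" (c0 :: cs))]) (by simp)]
              simp
            · rw [if_neg hc, if_neg hc, pv_main p ls hls' [] res (by simp)]
              simp
      · rw [show pvStepB p (res, cur) l = (res, cur ++ [l]) by simp [pvStepB, h1],
          show pvStepSB ([], cur) l = ([], cur ++ [l]) by simp [pvStepSB, h1]]
        exact pv_main p ls hls' (cur ++ [l]) res (by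
          intro m hm
          rcases List.mem_append.1 hm with hm | hm
          · exact hcur m hm
          · simp at hm; subst hm; exact ⟨h1, hls m (by simp)⟩)

theorem pv_splitBlocks_eq (text : String) :
    pySplitBlocks text = pvFlush (List.foldl pvStepSB ([], []) (PySem.Str.splitlines text)) := rfl

theorem pv_lines_bf (text : String) : ∀ l ∈ PySem.Str.splitlines text, pvBF l.toList := by
  intro l hl
  rw [PySem.Str.splitlines] at hl
  obtain ⟨cl, hcl, rfl⟩ := List.mem_map.1 hl
  simpa using pv_splitlines_bf cl hcl

theorem pv_A_fun (text : String) (k : String) (p : String × String)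
    (hfun : ∀ (result : List String) (block : String),
      (fun (result : List String) (block : String) =>
        match pyTopLevelLines block with
        | [] => result
        | f :: _ =>
          let first := PySem.Str.strip f
          if k == "result-int" &&
              (PySem.Str.startswith first "result :" || PySem.Str.startswith first "let result") then
            result ++ [block]
          else if k == "main-io-int" &&
              (PySem.Str.startswith first "main :" || PySem.Str.startswith first "let main") then
            result ++ [block]
          else if k == "main-io-unit" &&
              (PySem.Str.startswith first "main :" || PySem.Str.startswith first "let main") then
            result ++ [block]
          else result) result block = pvStepA p result block) :
    entry_blocks_by_kind text k
      = List.foldl (pvStepA p) [] (pvStripF (pySplitBlocks text)) := by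
  rw [entry_blocks_by_kind]
  have : (fun (result : List String) (block : String) =>
        match pyTopLevelLines block with
        | [] => result
        | f :: _ =>
          let first := PySem.Str.strip f
          if k == "result-int" &&
              (PySem.Str.startswith first "result :" || PySem.Str.startswith first "let result") then
            result ++ [block]
          else if k == "main-io-int" &&
              (PySem.Str.startswith first "main :" || PySem.Str.startswith first "let main") then
            result ++ [block]
          else if k == "main-io-unit" &&
              (PySem.Str.startswith first "main :" || PySem.Str.startswith first "let main") then
            result ++ [block]
          else result) = pvStepA p := by
    funext result block
    exact hfun result block
  rw [this]
  rfl

theorem pv_B_known (text : String) (k : String) (p : String × String)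
    (hget : (PySem.Dict.mk
      [("result-int", ("result :", "let result")),
       ("main-io-int", ("main :", "let main")),
       ("main-io-unit", ("main :", "let main"))] : PySem.Dict String (String × String)).get? k
      = some p) :
    entry_blocks_by_kind_alt text k
      = (List.foldl (pvStepB p) ([], []) ((PySem.Str.splitlines text) ++ [""])).1 := by
  rw [entry_blocks_by_kind_alt]
  simp only [hget]
  rfl

theorem pv_equal_known (text : String) (k : String) (p : String × String)
    (hget : (PySem.Dict.mk
      [("result-int", ("result :", "let result")),
       ("main-io-int", ("main :", "let main")),
       ("main-io-unit", ("main :", "let main"))] : PySem.Dict String (String × String)).get? k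
      = some p)
    (hfun : ∀ (result : List String) (block : String),
      (fun (result : List String) (block : String) =>
        match pyTopLevelLines block with
        | [] => result
        | f :: _ =>
          let first := PySem.Str.strip f
          if k == "result-int" &&
              (PySem.Str.startswith first "result :" || PySem.Str.startswith first "let result") then
            result ++ [block]
          else if k == "main-io-int" &&
              (PySem.Str.startswith first "main :" || PySem.Str.startswith first "let main") then
            result ++ [block]
          else if k == "main-io-unit" &&
              (PySem.Str.startswith first "main :" || PySem.Str.startswith first "let main") then
            result ++ [block]
          else result) result block = pvStepA p result block) :
    entry_blocks_by_kind text k = entry_blocks_by_kind_alt text k := by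
  rw [pv_A_fun text k p hfun, pv_B_known text k p hget, pv_splitBlocks_eq,
    pv_main p (PySem.Str.splitlines text) (pv_lines_bf text) [] [] (by simp)]
  simp

theorem pv_A_unknown (text : String) (k : String)
    (h1 : (k == "result-int") = false) (h2 : (k == "main-io-int") = false)
    (h3 : (k == "main-io-unit") = false) :
    entry_blocks_by_kind text k = [] := by
  rw [entry_blocks_by_kind]
  have hfun : (fun (result : List String) (block : String) =>
      match pyTopLevelLines block with
      | [] => result
      | f :: _ =>
        let first := PySem.Str.strip f
        if k == "result-int" &&
            (PySem.Str.startswith first "result :" || PySem.Str.startswith first "let result") then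
          result ++ [block]
        else if k == "main-io-int" &&
            (PySem.Str.startswith first "main :" || PySem.Str.startswith first "let main") then
          result ++ [block]
        else if k == "main-io-unit" &&
            (PySem.Str.startswith first "main :" || PySem.Str.startswith first "let main") then
          result ++ [block]
        else result)
      = (fun (result : List String) (_ : String) => result) := by
    funext result block
    cases pyTopLevelLines block with
    | nil => rfl
    | cons f t => simp [h1, h2, h3]
  rw [hfun]
  have H : ∀ (bs : List String) (res : List String),
      List.foldl (fun (result : List String) (_ : String) => result) res bs = res := by
    intro bs
    induction bs with
    | nil => intro res; rfl
    | cons b bs ih => intro res; rw [List.foldl_cons]; exact ih res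
  exact H _ []

theorem pv_B_unknown (text : String) (k : String)
    (h1 : (k == "result-int") = false) (h2 : (k == "main-io-int") = false)
    (h3 : (k == "main-io-unit") = false) :
    entry_blocks_by_kind_alt text k = [] := by
  rw [entry_blocks_by_kind_alt]
  have hh1 : ("result-int" == k) = false := by
    cases hb : "result-int" == k
    · rfl
    · exact absurd (by simpa [eq_comm] using (beq_iff_eq.1 hb)) (by simpa using h1)
  have hh2 : ("main-io-int" == k) = false := by
    cases hb : "main-io-int" == k
    · rfl
    · exact absurd (by simpa [eq_comm] using (beq_iff_eq.1 hb)) (by simpa using h2)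
  have hh3 : ("main-io-unit" == k) = false := by
    cases hb : "main-io-unit" == k
    · rfl
    · exact absurd (by simpa [eq_comm] using (beq_iff_eq.1 hb)) (by simpa using h3)
  simp [PySem.Dict.get?, List.find?, hh1, hh2, hh3]

theorem pv_equal (text : String) (k : String) :
    entry_blocks_by_kind text k = entry_blocks_by_kind_alt text k := by
  by_cases e1 : k = "result-int"
  · subst e1
    apply pv_equal_known text _ ("result :", "let result") rfl
    intro result block
    cases htl : pyTopLevelLines block <;> simp [pvStepA, pvCond, htl]
  · by_cases e2 : k = "main-io-int"
    · subst e2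
      apply pv_equal_known text _ ("main :", "let main") rfl
      intro result block
      cases htl : pyTopLevelLines block <;> simp [pvStepA, pvCond, htl]
    · by_cases e3 : k = "main-io-unit"
      · subst e3
        apply pv_equal_known text _ ("main :", "let main") rfl
        intro result block
        cases htl : pyTopLevelLines block <;> simp [pvStepA, pvCond, htl]
      · rw [pv_A_unknown text k (by simpa using e1) (by simpa using e2) (by simpa using e3),
          pv_B_unknown text k (by simpa using e1) (by simpa using e2) (by simpa using e3)]

-- ===== VERDICT (by name: the statement is the Claim_ definition above) =====
theorem entry_blocks_by_kind_spec : Claim_equal_entry_blocks_by_kind := by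
  intro text entry_kind _
  show entry_blocks_by_kind text entry_kind = entry_blocks_by_kind_alt text entry_kind
  exact pv_equal text entry_kind
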